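-- pv_equiv track=rewrite | github.com/NikitaSLBD/AOIS | Lab1/binarithmetic.py | adding_mantisses
-- ===== SOURCE A (Python) =====
-- def adding_mantisses(mantiss1: str, mantiss2: str) -> str:
--     result = ""
--     carry = False
--
--     max_len = max(len(mantiss1), len(mantiss2))
--     mantiss1 = mantiss1.zfill(max_len)
--     mantiss2 = mantiss2.zfill(max_len)
--
--     for i in range(max_len - 1, 0, -1):
--
--         if (mantiss1[i] == "1" and mantiss2[i] == "1"):
--
--             if carry:
--                 result = "1" + result
--             else:
--                 result = "0" + result
--                 carry = True
--                 continue
--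
--         elif (mantiss1[i] == "0" and mantiss2[i] == "0"):
--
--             if carry:
--                 result = "1" + result
--                 carry = False
--             else: result = "0" + result
--
--         else:
--
--             if carry:
--                 result = "0" + result
--             else: result = "1" + result
--
--     if carry: result = "1" + result
--
--     result = result.zfill(31)
--
--     return result
-- ===== SOURCE B (Python) =====
-- def adding_mantisses(mantiss1: str, mantiss2: str) -> str:
--     # Arithmetic re-implementation: turn the digit pairs below the MSB into an
--     # integer sum, then format it back in binary with the same width.
--     max_len = max(len(mantiss1), len(mantiss2))
--     m1 = mantiss1.zfill(max_len)
--     m2 = mantiss2.zfill(max_len)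
--     total = 0
--     for a, b in zip(m1[1:], m2[1:]):
--         if a == "1" and b == "1":
--             d = 2
--         elif a == "0" and b == "0":
--             d = 0
--         else:
--             d = 1
--         total = total * 2 + d
--     return format(total, "b").zfill(max_len - 1).zfill(31)
-- ===== Notes on version B (the rewrite author's own statement) =====
-- stated objective: alternative
-- what changed: A ripple-carries character by character, threading a carry flag and building the result string by repeated prepending; B instead folds the digit pairs below the MSB into a single integer sum and formats that integer back to a zero-padded binary string.
import Mathlib
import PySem

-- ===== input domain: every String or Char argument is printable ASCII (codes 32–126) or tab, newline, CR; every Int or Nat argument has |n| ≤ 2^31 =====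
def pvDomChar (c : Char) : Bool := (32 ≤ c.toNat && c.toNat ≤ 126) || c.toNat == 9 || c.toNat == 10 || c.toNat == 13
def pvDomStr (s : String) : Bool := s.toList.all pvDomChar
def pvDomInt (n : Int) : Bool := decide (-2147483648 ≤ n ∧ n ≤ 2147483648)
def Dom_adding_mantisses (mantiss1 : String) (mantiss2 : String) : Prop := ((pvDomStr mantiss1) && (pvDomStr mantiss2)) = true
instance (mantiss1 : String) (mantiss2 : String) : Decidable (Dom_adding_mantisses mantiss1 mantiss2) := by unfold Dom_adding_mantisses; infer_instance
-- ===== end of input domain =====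

-- B replaces A's character-by-character ripple-carry loop by integer arithmetic: it sums the
-- digit pairs below the MSB into one integer and formats it back in binary (objective: alternative).

-- ===== PORT A =====
def adding_mantisses (mantiss1 : String) (mantiss2 : String) : String :=
  let maxLen : Int := max (PySem.Str.len mantiss1) (PySem.Str.len mantiss2)
  let m1 : List Char := PySem.Chars.zfill mantiss1.toList maxLen
  let m2 : List Char := PySem.Chars.zfill mantiss2.toList maxLen
  let st : List Char × Bool :=
    (PySem.List.pyRange (maxLen - 1) 0 (-1)).foldl
      (fun (st : List Char × Bool) (i : Int) =>
        let a : Char := PySem.List.pyGetD m1 i ' '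
        let b : Char := PySem.List.pyGetD m2 i ' '
        if a = '1' ∧ b = '1' then
          if st.2 then ('1' :: st.1, st.2) else ('0' :: st.1, true)
        else if a = '0' ∧ b = '0' then
          if st.2 then ('1' :: st.1, false) else ('0' :: st.1, st.2)
        else
          if st.2 then ('0' :: st.1, st.2) else ('1' :: st.1, false))
      ([], false)
  let result : List Char := if st.2 then '1' :: st.1 else st.1
  String.ofList (PySem.Chars.zfill result 31)

-- ===== PORT B =====
def adding_mantisses_alt (mantiss1 : String) (mantiss2 : String) : String :=
  let maxLen : Int := max (PySem.Str.len mantiss1) (PySem.Str.len mantiss2)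
  let m1 : List Char := PySem.Chars.zfill mantiss1.toList maxLen
  let m2 : List Char := PySem.Chars.zfill mantiss2.toList maxLen
  let total : Int :=
    (List.zip (PySem.List.slice m1 (some 1) none) (PySem.List.slice m2 (some 1) none)).foldl
      (fun (t : Int) (p : Char × Char) =>
        t * 2 + (if p.1 = '1' ∧ p.2 = '1' then 2 else if p.1 = '0' ∧ p.2 = '0' then 0 else 1)) 0
  String.ofList (PySem.Chars.zfill (PySem.Chars.zfill (PySem.Int.toBinChars total) (maxLen - 1)) 31)

-- ===== PRECONDITION & SPEC =====
def Spec_adding_mantisses (mantiss1 : String) (mantiss2 : String) (out : String) : Prop := out = adding_mantisses_alt mantiss1 mantiss2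
instance (mantiss1 : String) (mantiss2 : String) (out : String) : Decidable (Spec_adding_mantisses mantiss1 mantiss2 out) := by unfold Spec_adding_mantisses; infer_instance

-- ===== CLAIM (what is proved, stated in full; the proofs are below) =====
def Claim_equal_adding_mantisses : Prop := ∀ (mantiss1 : String) (mantiss2 : String), Dom_adding_mantisses mantiss1 mantiss2 → Spec_adding_mantisses mantiss1 mantiss2 (adding_mantisses mantiss1 mantiss2)

-- ===== LEMMAS AND PROOFS =====

-- digit value of one column pair (2/0/1 exactly as both ports branch)
def pvDig (p : Char × Char) : Nat :=
  if p.1 = '1' ∧ p.2 = '1' then 2 else if p.1 = '0' ∧ p.2 = '0' then 0 else 1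

-- A's loop, rephrased on the LSB-first pair list as a structural recursion
def pvF : List (Char × Char) → Bool → List Char × Bool
  | [], c => ([], c)
  | p :: r, c =>
    let s := pvDig p + (if c then 1 else 0)
    let t := pvF r (decide (2 ≤ s))
    (t.1 ++ [if s % 2 = 1 then '1' else '0'], t.2)

-- the low w bits of v, MSB first
def pvToBits : Nat → Nat → List Char
  | 0, _ => []
  | w + 1, v => pvToBits w (v / 2) ++ [if v % 2 = 1 then '1' else '0']

-- binary digits of v without leading zeros (what format(v, 'b') prints)
def pvBin (n : Nat) : List Char :=
  if n < 2 then [Nat.digitChar n] else pvBin (n / 2) ++ [Nat.digitChar (n % 2)]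
decreasing_by exact Nat.div_lt_self (by omega) (by omega)

-- value of an LSB-first pair list
def pvVal : List (Char × Char) → Nat
  | [] => 0
  | p :: r => pvDig p + 2 * pvVal r

theorem pvDig_le (p : Char × Char) : pvDig p ≤ 2 := by
  unfold pvDig; split_ifs <;> omega

theorem pvVal_lt (l : List (Char × Char)) : pvVal l + 2 ≤ 2 ^ (l.length + 1) := by
  induction l with
  | nil => simp [pvVal]
  | cons p r ih =>
      have := pvDig_le p
      simp only [pvVal, List.length_cons, pow_succ]
      omega

-- A's loop body on one column pair
def pvPairStep (st : List Char × Bool) (p : Char × Char) : List Char × Bool :=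
  if p.1 = '1' ∧ p.2 = '1' then
    if st.2 then ('1' :: st.1, st.2) else ('0' :: st.1, true)
  else if p.1 = '0' ∧ p.2 = '0' then
    if st.2 then ('1' :: st.1, false) else ('0' :: st.1, st.2)
  else
    if st.2 then ('0' :: st.1, st.2) else ('1' :: st.1, false)

-- the pair of characters A reads at index i
def pvG (c1 c2 : List Char) (i : Int) : Char × Char :=
  (PySem.List.pyGetD c1 i ' ', PySem.List.pyGetD c2 i ' ')

theorem pvFoldA_eq_pvF (rps : List (Char × Char)) (res : List Char) (c : Bool) :
    rps.foldl pvPairStep (res, c) = ((pvF rps c).1 ++ res, (pvF rps c).2) := by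
  induction rps generalizing res c with
  | nil => simp [pvF]
  | cons p r ih =>
      simp only [List.foldl_cons]
      by_cases h1 : p.1 = '1' ∧ p.2 = '1' <;> by_cases h2 : p.1 = '0' ∧ p.2 = '0' <;>
        cases c <;>
          simp [pvPairStep, pvF, pvDig, h1, h2, ih, List.append_assoc]

theorem pvF_eq_toBits (rps : List (Char × Char)) (c : Bool) :
    pvF rps c =
      (pvToBits rps.length (pvVal rps + (if c then 1 else 0)),
       decide (2 ^ rps.length ≤ pvVal rps + (if c then 1 else 0))) := by
  induction rps generalizing c with
  | nil => cases c <;> simp [pvF, pvVal, pvToBits]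
  | cons p r ih =>
      have hd := pvDig_le p
      have hk : 1 ≤ 2 ^ r.length := Nat.one_le_two_pow
      have hp : 2 ^ (r.length + 1) = 2 * 2 ^ r.length := by ring
      simp only [pvF, ih, pvVal, List.length_cons]
      set s := pvDig p + (if c then 1 else 0) with hs
      have hsle : s ≤ 3 := by rw [hs]; cases c <;> simp <;> omega
      refine Prod.ext ?_ ?_
      · show pvToBits r.length (pvVal r + (if decide (2 ≤ s) = true then 1 else 0)) ++ _ = pvToBits (r.length + 1) (pvDig p + 2 * pvVal r + (if c then 1 else 0))
        have h1 : pvDig p + 2 * pvVal r + (if c then 1 else 0) = s + 2 * pvVal r := by rw [hs]; ring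
        rw [h1]
        show _ = pvToBits r.length ((s + 2 * pvVal r) / 2) ++ [if (s + 2 * pvVal r) % 2 = 1 then '1' else '0']
        have h2 : (s + 2 * pvVal r) / 2 = pvVal r + (if decide (2 ≤ s) = true then 1 else 0) := by
          by_cases h : 2 ≤ s <;> simp [h] <;> omega
        have h3 : (s + 2 * pvVal r) % 2 = s % 2 := by omega
        rw [h2, h3]
      · show decide (2 ^ r.length ≤ pvVal r + (if decide (2 ≤ s) = true then 1 else 0)) = decide (2 ^ (r.length + 1) ≤ pvDig p + 2 * pvVal r + (if c then 1 else 0))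
        have h1 : pvDig p + 2 * pvVal r + (if c then 1 else 0) = s + 2 * pvVal r := by rw [hs]; ring
        rw [h1]
        by_cases h : 2 ≤ s <;> simp [h, decide_eq_decide] <;> omega

theorem pvVal_append_singleton (l : List (Char × Char)) (p : Char × Char) :
    pvVal (l ++ [p]) = pvVal l + 2 ^ l.length * pvDig p := by
  induction l with
  | nil => simp [pvVal]
  | cons q r ih =>
      simp only [List.cons_append, pvVal, ih, List.length_cons, pow_succ]
      ring

theorem pvFoldB_eq_pvVal (ps : List (Char × Char)) (a : Nat) :
    ps.foldl
      (fun (t : Int) (p : Char × Char) =>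
        t * 2 + (if p.1 = '1' ∧ p.2 = '1' then 2 else if p.1 = '0' ∧ p.2 = '0' then 0 else 1))
      (a : Int)
    = ((a * 2 ^ ps.length + pvVal ps.reverse : Nat) : Int) := by
  induction ps generalizing a with
  | nil => simp [pvVal]
  | cons p r ih =>
      have hstep : ((a : Int) * 2 + (if p.1 = '1' ∧ p.2 = '1' then 2 else if p.1 = '0' ∧ p.2 = '0' then 0 else 1)) = ((a * 2 + pvDig p : Nat) : Int) := by
        unfold pvDig; split_ifs <;> push_cast <;> ring
      simp only [List.foldl_cons, hstep, ih, List.reverse_cons, List.length_cons]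
      congr 1
      rw [pvVal_append_singleton]
      have : r.reverse.length = r.length := r.length_reverse
      rw [this]
      ring

theorem pvZfill_nosign (cs : List Char) (w : Int)
    (h : ∀ c ∈ cs.head?, c ≠ '+' ∧ c ≠ '-') :
    PySem.Chars.zfill cs w = List.replicate (w.toNat - cs.length) '0' ++ cs := by
  unfold PySem.Chars.zfill
  split
  · next hw =>
      have : w.toNat - cs.length = 0 := by omega
      simp [this]
  · next hw =>
      match cs with
      | [] => simp
      | c :: rest =>
          have hc := h c (by simp)
          have : ¬ (c = '+' ∨ c = '-') := by tauto
          simp [this]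

theorem pvBin_mem (n : Nat) : ∀ c ∈ pvBin n, c = '0' ∨ c = '1' := by
  induction n using Nat.strong_induction_on with
  | _ n ih =>
      unfold pvBin
      split
      · next h => intro c hc; interval_cases n <;> simp_all <;> decide
      · next h =>
          intro c hc
          rcases List.mem_append.1 hc with h1 | h1
          · exact ih (n / 2) (by omega) c h1
          · have : n % 2 < 2 := by omega
            interval_cases hm : n % 2 <;> simp_all <;> decide

theorem pvBin_len_le (w n : Nat) (h1 : 1 ≤ w) (h2 : n < 2 ^ w) : (pvBin n).length ≤ w := by
  induction n using Nat.strong_induction_on generalizing w with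
  | _ n ih =>
      unfold pvBin
      split
      · next h => simpa using h1
      · next h =>
          have hw2 : 2 ≤ w := by
            by_contra hc
            have : w = 1 := by omega
            subst this
            omega
          have hndiv : n / 2 < 2 ^ (w - 1) := by
            have : 2 ^ w = 2 * 2 ^ (w - 1) := by
              conv_lhs => rw [show w = (w - 1) + 1 by omega]
              ring
            omega
          have := ih (n / 2) (by omega) (w - 1) (by omega) hndiv
          simp only [List.length_append, List.length_cons, List.length_nil]
          omega

theorem pvBin_len_ge (w n : Nat) (h : 2 ^ w ≤ n) : w + 1 ≤ (pvBin n).length := by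
  induction n using Nat.strong_induction_on generalizing w with
  | _ n ih =>
      unfold pvBin
      split
      · next hn =>
          have : w = 0 := by
            by_contra hc
            have : 2 ≤ 2 ^ w := by
              calc 2 = 2 ^ 1 := by norm_num
              _ ≤ 2 ^ w := Nat.pow_le_pow_right (by norm_num) (by omega)
            omega
          simp [this]
      · next hn =>
          rcases Nat.eq_zero_or_pos w with hw | hw
          · simp [hw]
          · have hdiv : 2 ^ (w - 1) ≤ n / 2 := by
              have : 2 ^ w = 2 * 2 ^ (w - 1) := by
                conv_lhs => rw [show w = (w - 1) + 1 by omega]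
                ring
              omega
            have := ih (n / 2) (by omega) (w - 1) hdiv
            simp only [List.length_append, List.length_cons, List.length_nil]
            omega

theorem pvToBits_eq_pad (w n : Nat) (h1 : 1 ≤ w) (h2 : n < 2 ^ w) :
    pvToBits w n = List.replicate (w - (pvBin n).length) '0' ++ pvBin n := by
  induction w generalizing n with
  | zero => omega
  | succ w ihw =>
      rcases Nat.eq_zero_or_pos w with hw | hw
      · subst hw
        have : n < 2 := by simpa using h2
        unfold pvToBits pvBin
        interval_cases n <;> simp [pvToBits] <;> decide
      · have hdiv : n / 2 < 2 ^ w := by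
          have : 2 ^ (w + 1) = 2 * 2 ^ w := by ring
          omega
        show pvToBits w (n / 2) ++ [if n % 2 = 1 then '1' else '0'] = _
        rw [ihw (n / 2) hw hdiv]
        by_cases hn : n < 2
        · have hn2 : n / 2 = 0 := by omega
          rw [hn2]
          have hb0 : pvBin 0 = ['0'] := by unfold pvBin; decide
          conv_rhs => unfold pvBin
          simp only [hb0, hn, if_pos]
          simp only [List.length_cons, List.length_nil]
          rw [show List.replicate (w - 1) '0' ++ ['0'] = List.replicate w '0' by
            rw [← List.replicate_succ']; congr 1; omega]
          have : (w + 1) - 1 = w := by omega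
          rw [this]
          congr 1
          interval_cases n <;> decide
        · have hch2 : (if n % 2 = 1 then '1' else '0') = Nat.digitChar (n % 2) := by
            have hm2 : n % 2 < 2 := by omega
            interval_cases hm : n % 2 <;> decide
          conv_rhs => unfold pvBin
          simp only [hn, if_false]
          simp only [List.length_append, List.length_cons, List.length_nil]
          have h1 : w + 1 - ((pvBin (n / 2)).length + 1) = w - (pvBin (n / 2)).length := by omega
          rw [h1, hch2, List.append_assoc]

theorem pvToBits_succ_msb (w n : Nat) :
    pvToBits (w + 1) n = (if n / 2 ^ w % 2 = 1 then '1' else '0') :: pvToBits w n := by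
  induction w generalizing n with
  | zero => simp [pvToBits]
  | succ w ihw =>
      show pvToBits (w + 1) (n / 2) ++ [if n % 2 = 1 then '1' else '0'] = _
      rw [ihw (n / 2)]
      have : n / 2 / 2 ^ w = n / 2 ^ (w + 1) := by
        rw [Nat.div_div_eq_div_mul]
        congr 1
        ring
      rw [this]
      rfl

theorem pvToDigitsCore_eq_pvBin (f n : Nat) (acc : List Char) (h1 : 1 ≤ f) (h2 : n < 2 ^ f) :
    Nat.toDigitsCore 2 f n acc = pvBin n ++ acc := by
  induction f generalizing n acc with
  | zero => omega
  | succ f ihf =>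
      show (if n / 2 = 0 then (n % 2).digitChar :: acc else Nat.toDigitsCore 2 f (n / 2) ((n % 2).digitChar :: acc)) = _
      by_cases hn : n / 2 = 0
      · have hn2 : n < 2 := by omega
        unfold pvBin
        simp [hn, hn2, Nat.mod_eq_of_lt hn2]
      · have hf1 : 1 ≤ f := by
          by_contra hc
          have : f = 0 := by omega
          subst this
          simp at h2
          omega
        have hdiv : n / 2 < 2 ^ f := by
          have : 2 ^ (f + 1) = 2 * 2 ^ f := by ring
          omega
        rw [if_neg hn, ihf (n / 2) _ hf1 hdiv]
        conv_rhs => unfold pvBin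
        have hn2 : ¬ n < 2 := by omega
        simp [hn2, List.append_assoc]

theorem pvToBinChars_eq_pvBin (n : Nat) : PySem.Int.toBinChars (n : Int) = pvBin n := by
  unfold PySem.Int.toBinChars
  have h1 : ¬ ((n : Int) < 0) := Int.not_lt.mpr (Int.natCast_nonneg n)
  rw [if_neg h1]
  show Nat.toDigitsCore 2 ((n : Int).toNat + 1) (n : Int).toNat [] = _
  have h2 : (n : Int).toNat = n := Int.toNat_natCast n
  rw [h2, pvToDigitsCore_eq_pvBin (n + 1) n [] (by omega) (by
    calc n < 2 ^ n := Nat.lt_two_pow_self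
    _ ≤ 2 ^ (n + 1) := Nat.pow_le_pow_right (by norm_num) (by omega))]
  simp

theorem pvHeadBin (n : Nat) : ∀ c ∈ (pvBin n).head?, c ≠ '+' ∧ c ≠ '-' := by
  intro c hc
  rcases pvBin_mem n c (List.mem_of_mem_head? hc) with h | h <;> subst h <;> exact ⟨by decide, by decide⟩

theorem pvKey (l1 l2 : List Char) :
    PySem.Chars.zfill
      (let st :=
        (PySem.List.pyRange (max (l1.length : Int) (l2.length : Int) - 1) 0 (-1)).foldl
          (fun st i => pvPairStep st
            (pvG (PySem.Chars.zfill l1 (max (l1.length : Int) (l2.length : Int)))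
                 (PySem.Chars.zfill l2 (max (l1.length : Int) (l2.length : Int))) i))
          ([], false)
       if st.2 then '1' :: st.1 else st.1) 31
    = PySem.Chars.zfill
        (PySem.Chars.zfill
          (PySem.Int.toBinChars
            ((List.zip
                (PySem.List.slice (PySem.Chars.zfill l1 (max (l1.length : Int) (l2.length : Int))) (some 1) none)
                (PySem.List.slice (PySem.Chars.zfill l2 (max (l1.length : Int) (l2.length : Int))) (some 1) none)).foldl
              (fun (t : Int) (p : Char × Char) =>
                t * 2 + (if p.1 = '1' ∧ p.2 = '1' then 2 else if p.1 = '0' ∧ p.2 = '0' then 0 else 1)) 0))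
          (max (l1.length : Int) (l2.length : Int) - 1)) 31 := by
  set M : Int := max (l1.length : Int) (l2.length : Int) with hMdef
  have hM1 : (l1.length : Int) ≤ M := le_max_left _ _
  have hM2 : (l2.length : Int) ≤ M := le_max_right _ _
  have hM0 : (0 : Int) ≤ M := le_trans (Int.natCast_nonneg _) hM1
  set c1 : List Char := PySem.Chars.zfill l1 M with hc1
  set c2 : List Char := PySem.Chars.zfill l2 M with hc2
  have hlen1 : c1.length = M.toNat := by
    rw [hc1, PySem.Chars.length_zfill]; omega
  have hlen2 : c2.length = M.toNat := by
    rw [hc2, PySem.Chars.length_zfill]; omega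
  have hslice1 : PySem.List.slice c1 (some 1) none = c1.drop 1 :=
    PySem.List.slice_from c1 (by norm_num)
  have hslice2 : PySem.List.slice c2 (some 1) none = c2.drop 1 :=
    PySem.List.slice_from c2 (by norm_num)
  have hrange : PySem.List.pyRange (M - 1) 0 (-1) = (PySem.List.pyRange 1 M).reverse := by
    have h := PySem.List.pyRange_neg_one_eq_reverse (M - 1) 0
    norm_num at h
    exact h
  have hzip : (PySem.List.pyRange 1 M).map (pvG c1 c2) = (c1.drop 1).zip (c2.drop 1) := by
    have e1 : (PySem.List.pyRange 1 (PySem.List.len c1)).map (fun i => PySem.List.pyGetD c1 i ' ') = c1.drop 1 := by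
      have h := PySem.List.map_pyGetD_pyRange c1 ' ' (a := 1) (by norm_num)
      simpa using h
    have e2 : (PySem.List.pyRange 1 (PySem.List.len c2)).map (fun i => PySem.List.pyGetD c2 i ' ') = c2.drop 1 := by
      have h := PySem.List.map_pyGetD_pyRange c2 ' ' (a := 1) (by norm_num)
      simpa using h
    have hlc1 : PySem.List.len c1 = M := by
      show ((c1.length : Int)) = M
      rw [hlen1]; omega
    have hlc2 : PySem.List.len c2 = M := by
      show ((c2.length : Int)) = M
      rw [hlen2]; omega
    rw [hlc1] at e1
    rw [hlc2] at e2
    rw [← e1, ← e2, List.zip_map']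
    rfl
  set rps : List (Char × Char) := ((c1.drop 1).zip (c2.drop 1)).reverse with hrps
  have hfoldA : (PySem.List.pyRange (M - 1) 0 (-1)).foldl (fun st i => pvPairStep st (pvG c1 c2 i)) ([], false)
      = rps.foldl pvPairStep ([], false) := by
    rw [hrange, hrps, ← hzip, ← List.map_reverse, List.foldl_map]
  set m : Nat := rps.length with hm
  set T : Nat := pvVal rps with hT
  have hstval : rps.foldl pvPairStep ([], false) = (pvToBits m T, decide (2 ^ m ≤ T)) := by
    rw [pvFoldA_eq_pvF, pvF_eq_toBits]
    simp
    exact ⟨rfl, Iff.rfl⟩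
  have hTlt : T + 2 ≤ 2 ^ (m + 1) := pvVal_lt rps
  have hfoldB : ((c1.drop 1).zip (c2.drop 1)).foldl
      (fun (t : Int) (p : Char × Char) =>
        t * 2 + (if p.1 = '1' ∧ p.2 = '1' then 2 else if p.1 = '0' ∧ p.2 = '0' then 0 else 1)) 0
      = (T : Int) := by
    have h := pvFoldB_eq_pvVal ((c1.drop 1).zip (c2.drop 1)) 0
    simpa [hT, hrps] using h
  rw [hslice1, hslice2, hfoldB, pvToBinChars_eq_pvBin]
  simp only [hfoldA, hstval]
  have hmlen : m = M.toNat - 1 := by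
    rw [hm, hrps]
    simp [List.length_zip, hlen1, hlen2]
  by_cases hN : 2 ≤ M.toNat
  · -- at least two columns: the results agree even before the final zfill 31
    have hm1 : 1 ≤ m := by omega
    have hMm : (M - 1).toNat = m := by omega
    by_cases hc : 2 ^ m ≤ T
    · -- final carry: both sides are the m+1 binary digits of T
      have hdone : (decide (2 ^ m ≤ T)) = true := by simpa using hc
      rw [hdone]
      have hmsb : T / 2 ^ m % 2 = 1 := by
        have h1 : T / 2 ^ m = 1 := Nat.div_eq_of_lt_le (by omega) (by omega)
        rw [h1]
      have hA : ('1' :: pvToBits m T : List Char) = pvToBits (m + 1) T := by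
        rw [pvToBits_succ_msb, hmsb]
        norm_num
      have hL : (pvBin T).length = m + 1 :=
        le_antisymm (pvBin_len_le (m + 1) T (by omega) (by omega)) (pvBin_len_ge m T hc)
      have hB : PySem.Chars.zfill (pvBin T) (M - 1) = pvBin T := by
        rw [pvZfill_nosign _ _ (pvHeadBin T)]
        rw [show (M - 1).toNat - (pvBin T).length = 0 from by omega]
        simp
      rw [hB, hA]
      rw [pvToBits_eq_pad (m + 1) T (by omega) (by omega), hL]
      simp
    · -- no carry: both sides are the m binary digits of T
      have hdone : (decide (2 ^ m ≤ T)) = false := by simpa using hc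
      rw [hdone]
      have hB : PySem.Chars.zfill (pvBin T) (M - 1) = pvToBits m T := by
        rw [pvZfill_nosign _ _ (pvHeadBin T), hMm,
          pvToBits_eq_pad m T hm1 (by omega)]
      rw [hB]
      simp
  · -- zero or one column: A yields "" and B yields "0"; zfill 31 equalises them
    have hxs : c1.drop 1 = [] := by
      apply List.drop_eq_nil_of_le
      omega
    have hrps0 : rps = [] := by rw [hrps, hxs]; simp
    have hm0 : m = 0 := by rw [hm, hrps0]; rfl
    have hT0 : T = 0 := by rw [hT, hrps0]; rfl
    rw [hm0, hT0]
    norm_num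
    have hb0 : pvBin 0 = ['0'] := by unfold pvBin; decide
    have hB : PySem.Chars.zfill (pvBin 0) (M - 1) = ['0'] := by
      rw [hb0, pvZfill_nosign _ _ (by intro c hc; simp at hc; subst hc; exact ⟨by decide, by decide⟩)]
      rw [show (M - 1).toNat - (['0'] : List Char).length = 0 from by simp; omega]
      simp
    rw [hB]
    rw [pvZfill_nosign _ _ (by
          intro c hc
          rw [show pvToBits 0 0 = ([] : List Char) from rfl] at hc
          simp at hc),
        pvZfill_nosign _ _ (by intro c hc; simp at hc; subst hc; exact ⟨by decide, by decide⟩)]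
    rw [show pvToBits 0 0 = ([] : List Char) from rfl]
    norm_num
    decide

-- ===== VERDICT (by name: the statement is the Claim_ definition above) =====
theorem adding_mantisses_spec : Claim_equal_adding_mantisses := by
  intro s1 s2 _
  show adding_mantisses s1 s2 = adding_mantisses_alt s1 s2
  show String.ofList (PySem.Chars.zfill _ 31) = String.ofList (PySem.Chars.zfill _ 31)
  exact congrArg String.ofList (pvKey s1.toList s2.toList)
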